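-- pv_equiv track=rewrite | github.com/MightyCreak/diffuse | src/diffuse/widgets.py | _cut_blocks
-- ===== SOURCE A (Python) =====
-- def _cut_blocks(i, blocks):
--     pre, post, nlines = [], [], 0
--     for b in blocks:
--         if nlines >= i:
--             post.append(b)
--         elif nlines + b <= i:
--             pre.append(b)
--         else:
--             n = i - nlines
--             pre.append(n)
--             post.append(b - n)
--         nlines += b
--     return pre, post
-- ===== SOURCE B (Python) =====
-- def _cut_blocks(i, blocks):
--     cums = [0]
--     for b in blocks:
--         cums.append(cums[-1] + b)
--     pre = [min(b, i - c) for c, b in zip(cums, blocks) if c < i]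
--     post = [min(b, c + b - i) for c, b in zip(cums, blocks) if c >= i or c + b > i]
--     return pre, post
-- ===== Notes on version B (the rewrite author's own statement) =====
-- stated objective: alternative
-- what changed: Replaced the stateful three-branch accumulator loop by a prefix-sum list and two independent filtered comprehensions whose values are min-expressions.
import Mathlib
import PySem

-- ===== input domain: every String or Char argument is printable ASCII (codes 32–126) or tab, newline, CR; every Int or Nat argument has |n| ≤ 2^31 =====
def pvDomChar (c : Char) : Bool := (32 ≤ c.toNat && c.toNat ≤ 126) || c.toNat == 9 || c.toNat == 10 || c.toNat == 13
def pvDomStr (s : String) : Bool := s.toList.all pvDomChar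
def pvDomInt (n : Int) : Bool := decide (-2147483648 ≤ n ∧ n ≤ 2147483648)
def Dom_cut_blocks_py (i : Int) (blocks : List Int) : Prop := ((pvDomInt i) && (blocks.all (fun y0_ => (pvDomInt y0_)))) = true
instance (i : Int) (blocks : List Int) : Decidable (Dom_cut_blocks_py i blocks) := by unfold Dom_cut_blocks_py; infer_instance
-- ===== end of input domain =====

-- B replaces A's stateful three-branch loop by prefix sums plus two filtered comprehensions (alternative decomposition, same cost).

-- ===== PORT A =====
-- one pass, state (pre, post, nlines), three branches, as in the Python
def cut_blocks_py (i : Int) (blocks : List Int) : List Int × List Int :=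
  let s := blocks.foldl (fun (s : List Int × List Int × Int) b =>
    if s.2.2 ≥ i then (s.1, s.2.1 ++ [b], s.2.2 + b)
    else if s.2.2 + b ≤ i then (s.1 ++ [b], s.2.1, s.2.2 + b)
    else (s.1 ++ [i - s.2.2], s.2.1 ++ [b - (i - s.2.2)], s.2.2 + b)) ([], [], 0)
  (s.1, s.2.1)

-- ===== PORT B =====
-- prefix-sum list cums (cums[-1] tracked as the fold state's second component), then two filtered comprehensions
def cut_blocks_py_alt (i : Int) (blocks : List Int) : List Int × List Int :=
  let cums := (blocks.foldl (fun (acc : List Int × Int) b => (acc.1 ++ [acc.2 + b], acc.2 + b)) ([0], 0)).1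
  let pre := (cums.zip blocks).filterMap (fun cb => if cb.1 < i then some (min cb.2 (i - cb.1)) else none)
  let post := (cums.zip blocks).filterMap (fun cb => if cb.1 ≥ i ∨ cb.1 + cb.2 > i then some (min cb.2 (cb.1 + cb.2 - i)) else none)
  (pre, post)

-- ===== PRECONDITION & SPEC =====
def Spec_cut_blocks_py (i : Int) (blocks : List Int) (out : List Int × List Int) : Prop := out = cut_blocks_py_alt i blocks
instance (i : Int) (blocks : List Int) (out : List Int × List Int) : Decidable (Spec_cut_blocks_py i blocks out) := by unfold Spec_cut_blocks_py; infer_instance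

-- ===== CLAIM (what is proved, stated in full; the proofs are below) =====
def Claim_equal_cut_blocks_py : Prop := ∀ (i : Int) (blocks : List Int), Dom_cut_blocks_py i blocks → Spec_cut_blocks_py i blocks (cut_blocks_py i blocks)

-- ===== LEMMAS AND PROOFS =====

-- reference recursions: what both sides compute from a running total c
def preF (i c : Int) : List Int → List Int
  | [] => []
  | b :: bs => (if c < i then [min b (i - c)] else []) ++ preF i (c + b) bs

def postF (i c : Int) : List Int → List Int
  | [] => []
  | b :: bs => (if c ≥ i ∨ c + b > i then [min b (c + b - i)] else []) ++ postF i (c + b) bs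

def cumsF (c : Int) : List Int → List Int
  | [] => []
  | b :: bs => (c + b) :: cumsF (c + b) bs

theorem a_fold_eq (i : Int) (bs : List Int) : ∀ (pre post : List Int) (c : Int),
    bs.foldl (fun (s : List Int × List Int × Int) b =>
      if s.2.2 ≥ i then (s.1, s.2.1 ++ [b], s.2.2 + b)
      else if s.2.2 + b ≤ i then (s.1 ++ [b], s.2.1, s.2.2 + b)
      else (s.1 ++ [i - s.2.2], s.2.1 ++ [b - (i - s.2.2)], s.2.2 + b)) (pre, post, c)
    = (pre ++ preF i c bs, post ++ postF i c bs, c + bs.sum) := by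
  induction bs with
  | nil => intro pre post c; simp [preF, postF]
  | cons b bs ih =>
    intro pre post c
    simp only [List.foldl_cons, preF, postF, List.sum_cons]
    by_cases h1 : c ≥ i
    · have hc : ¬ c < i := by omega
      have hmin : min b (c + b - i) = b := by omega
      simp [h1, hc, hmin, ih, List.append_assoc]
      omega
    · have hc : c < i := by omega
      by_cases h2 : c + b ≤ i
      · have hp : ¬ (c ≥ i ∨ c + b > i) := by omega
        have hmin : min b (i - c) = b := by omega
        simp [h1, h2, hc, hmin, ih, List.append_assoc]
        omega
      · have hp : c ≥ i ∨ c + b > i := by omega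
        have hmin1 : min b (i - c) = i - c := by omega
        have hmin2 : min b (c + b - i) = c + b - i := by omega
        have hbn : b - (i - c) = c + b - i := by ring
        have hlt : i < c + b := by omega
        simp [h1, h2, hc, hlt, hmin1, hmin2, hbn, ih, List.append_assoc]
        omega

theorem b_cums_fold (bs : List Int) : ∀ (acc : List Int) (c : Int),
    bs.foldl (fun (acc : List Int × Int) b => (acc.1 ++ [acc.2 + b], acc.2 + b)) (acc, c)
    = (acc ++ cumsF c bs, c + bs.sum) := by
  induction bs with
  | nil => intro acc c; simp [cumsF]
  | cons b bs ih =>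
    intro acc c
    simp [cumsF, ih, List.append_assoc]
    omega

theorem b_pre_eq (i : Int) (bs : List Int) : ∀ (c : Int),
    ((c :: cumsF c bs).zip bs).filterMap
      (fun cb => if cb.1 < i then some (min cb.2 (i - cb.1)) else none)
    = preF i c bs := by
  induction bs with
  | nil => intro c; simp [preF]
  | cons b bs ih =>
    intro c
    simp only [cumsF, List.zip_cons_cons, List.filterMap_cons, preF]
    by_cases h : c < i <;> simp [h, ih]

theorem b_post_eq (i : Int) (bs : List Int) : ∀ (c : Int),
    ((c :: cumsF c bs).zip bs).filterMap
      (fun cb => if cb.1 ≥ i ∨ cb.1 + cb.2 > i then some (min cb.2 (cb.1 + cb.2 - i)) else none)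
    = postF i c bs := by
  induction bs with
  | nil => intro c; simp [postF]
  | cons b bs ih =>
    intro c
    simp only [cumsF, List.zip_cons_cons, List.filterMap_cons, postF]
    by_cases h : c ≥ i ∨ c + b > i <;> simp [h, ih]

theorem alt_eq (i : Int) (bs : List Int) :
    cut_blocks_py_alt i bs = (preF i 0 bs, postF i 0 bs) := by
  unfold cut_blocks_py_alt
  simp only [b_cums_fold, List.singleton_append]
  exact Prod.ext (b_pre_eq i bs 0) (b_post_eq i bs 0)

-- ===== VERDICT (by name: the statement is the Claim_ definition above) =====
theorem cut_blocks_py_spec : Claim_equal_cut_blocks_py := by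
  intro i blocks _
  unfold Spec_cut_blocks_py cut_blocks_py
  simp only [a_fold_eq, alt_eq, List.nil_append]
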